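-- pv_equiv track=rewrite | github.com/SmallStom/NER | step1_offline/utils.py | get_bigrams
-- ===== SOURCE A (Python) =====
-- def get_bigrams(words):
--     result = []
--     for i, w in enumerate(words):
--         if i != len(words) - 1:
--             result.append(words[i] + words[i + 1])
--         else:
--             result.append(words[i] + '<end>')
--
--     return result
-- ===== SOURCE B (Python) =====
-- def get_bigrams(words):
--     nxt = list(words)[1:] + ['<end>']
--     return [a + b for a, b in zip(words, nxt)]
-- ===== Notes on version B (the rewrite author's own statement) =====
-- stated objective: idiomatic
-- what changed: Replaces the index loop with its per-iteration last-element branch by an up-front shifted 'next' list and one uniform zip/pairwise-concatenation pass.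
import Mathlib
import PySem

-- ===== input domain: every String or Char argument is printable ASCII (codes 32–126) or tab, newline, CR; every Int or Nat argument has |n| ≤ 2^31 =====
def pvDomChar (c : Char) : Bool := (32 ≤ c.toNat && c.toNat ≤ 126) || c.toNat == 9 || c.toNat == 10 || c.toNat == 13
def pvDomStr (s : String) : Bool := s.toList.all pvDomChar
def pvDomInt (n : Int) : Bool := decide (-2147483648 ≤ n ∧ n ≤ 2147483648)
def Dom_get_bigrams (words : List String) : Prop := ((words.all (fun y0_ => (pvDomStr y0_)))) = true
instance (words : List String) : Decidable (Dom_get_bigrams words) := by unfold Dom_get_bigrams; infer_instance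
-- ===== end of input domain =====

-- B replaces A's index loop and its last-element branch by a shifted 'next' list zipped with the input; return values proved equal.

-- ===== PORT A =====
-- for i, w in enumerate(words): branch on i != len(words)-1, appending words[i]+words[i+1] or words[i]+'<end>'.
-- The pyGetD defaults are unreachable: i and (on the taken branch) i+1 are always in range.
def get_bigrams (words : List String) : List String :=
  (PySem.List.enumerate words).foldl (fun result iw =>
    if iw.1 ≠ (words.length : Int) - 1 then
      result ++ [PySem.List.pyGetD words iw.1 "" ++ PySem.List.pyGetD words (iw.1 + 1) ""]
    else
      result ++ [PySem.List.pyGetD words iw.1 "" ++ "<end>"]) []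

-- ===== PORT B =====
-- nxt = list(words)[1:] + ['<end>']; [a + b for a, b in zip(words, nxt)]
def get_bigrams_alt (words : List String) : List String :=
  let nxt := words.drop 1 ++ ["<end>"]
  (words.zip nxt).map (fun ab => ab.1 ++ ab.2)

-- ===== PRECONDITION & SPEC =====
def Spec_get_bigrams (words : List String) (out : List String) : Prop := out = get_bigrams_alt words
instance (words : List String) (out : List String) : Decidable (Spec_get_bigrams words out) := by unfold Spec_get_bigrams; infer_instance

-- ===== CLAIM (what is proved, stated in full; the proofs are below) =====
def Claim_equal_get_bigrams : Prop := ∀ (words : List String), Dom_get_bigrams words → Spec_get_bigrams words (get_bigrams words)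

-- ===== LEMMAS AND PROOFS =====

-- A's loop body is an unconditional append of one element; fold = map over the enumeration.
theorem get_bigrams_eq_map (words : List String) :
    get_bigrams words = (PySem.List.enumerate words).map (fun iw =>
      if iw.1 ≠ (words.length : Int) - 1 then
        PySem.List.pyGetD words iw.1 "" ++ PySem.List.pyGetD words (iw.1 + 1) ""
      else
        PySem.List.pyGetD words iw.1 "" ++ "<end>") := by
  unfold get_bigrams
  rw [show (fun (result : List String) (iw : Int × String) =>
      if iw.1 ≠ (words.length : Int) - 1 then
        result ++ [PySem.List.pyGetD words iw.1 "" ++ PySem.List.pyGetD words (iw.1 + 1) ""]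
      else
        result ++ [PySem.List.pyGetD words iw.1 "" ++ "<end>"]) =
    (fun result iw => result ++ [if iw.1 ≠ (words.length : Int) - 1 then
        PySem.List.pyGetD words iw.1 "" ++ PySem.List.pyGetD words (iw.1 + 1) ""
      else
        PySem.List.pyGetD words iw.1 "" ++ "<end>"]) from by
      funext r iw; split <;> rfl]
  simpa using PySem.List.foldl_append_singleton_eq_map
    (l := PySem.List.enumerate words) (acc := []) (f := _)

-- ===== VERDICT (by name: the statement is the Claim_ definition above) =====
theorem get_bigrams_spec : Claim_equal_get_bigrams := by
  intro words _
  show get_bigrams words = get_bigrams_alt words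
  rw [get_bigrams_eq_map]
  unfold get_bigrams_alt
  apply List.ext_getElem
  · simp [PySem.List.length_enumerate, List.length_zip]
    omega
  · intro k hk1 hk2
    have hklt : k < words.length := by
      simpa [PySem.List.length_enumerate] using hk1
    simp only [List.getElem_map, PySem.List.getElem_enumerate, List.getElem_zip]
    have hget : PySem.List.pyGetD words ((0 : Int) + (k : Int)) "" = words[k] := by
      rw [show (0 : Int) + (k : Int) = (k : Int) by ring]
      simpa using PySem.List.pyGetD_ofNat (xs := words) (n := k) (d := "") hklt
    by_cases hlast : k = words.length - 1
    · have : ¬ ((0 : Int) + (k : Int) ≠ (words.length : Int) - 1) := by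
        simp; omega
      rw [if_neg this, hget]
      have hlen : k < (words.drop 1 ++ ["<end>"]).length := by simp; omega
      have : (words.drop 1 ++ ["<end>"])[k]'hlen = "<end>" := by
        rw [List.getElem_append_right (by simp; omega)]
        simp
      rw [this]
    · have hne : ((0 : Int) + (k : Int) ≠ (words.length : Int) - 1) := by
        simp; omega
      rw [if_pos hne, hget]
      have hk1lt : k + 1 < words.length := by omega
      have hget2 : PySem.List.pyGetD words ((0 : Int) + (k : Int) + 1) "" = words[k + 1] := by
        rw [show (0 : Int) + (k : Int) + 1 = ((k + 1 : Nat) : Int) by push_cast; ring]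
        simpa using PySem.List.pyGetD_ofNat (xs := words) (n := k + 1) (d := "") hk1lt
      rw [hget2]
      have hlen : k < (words.drop 1 ++ ["<end>"]).length := by simp; omega
      have : (words.drop 1 ++ ["<end>"])[k]'hlen = words[k + 1] := by
        rw [List.getElem_append_left (by simp; omega)]
        simp
      rw [this]
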